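-- pv_equiv track=rewrite | github.com/shanjiaming/lean-pl-fix | solvers/decompose_solver_unified.py | convert_theorem_to_example_cmd
-- ===== SOURCE A (Python) =====
-- def convert_theorem_to_example_cmd(input_str: str) -> str:
--     """Convert theorem to example command format"""
--     lines = input_str.split('\n')
--     output_lines = []
--     theorem_found = False
--     indent_prefix = "  "
--
--     for line in lines:
--         if not theorem_found:
--             theorem_keyword_index = line.find("theorem")
--             if theorem_keyword_index != -1:
--                 theorem_found = True
--                 before_theorem = line[:theorem_keyword_index]
--                 after_theorem_keyword = line[theorem_keyword_index + len("theorem"):]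
--                 output_lines.append(f"{before_theorem}example := by")
--                 output_lines.append(f"{indent_prefix}have{after_theorem_keyword}")
--             else:
--                 output_lines.append(line)
--         else:
--             output_lines.append(f"{indent_prefix}{line}")
--
--     return '\n'.join(output_lines)
-- ===== SOURCE B (Python) =====
-- def convert_theorem_to_example_cmd(input_str: str) -> str:
--     """Convert theorem to example command format"""
--     lines = input_str.split('\n')
--     pivot = None
--     for i, line in enumerate(lines):
--         pos = line.find('theorem')
--         if pos != -1:
--             pivot = (i, pos, line)
--             break
--     if pivot is None:
--         return '\n'.join(lines)
--     i, pos, line = pivot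
--     head = [f"{line[:pos]}example := by",
--             f"  have{line[pos + len('theorem'):]}"]
--     tail = ['  ' + l for l in lines[i + 1:]]
--     return '\n'.join(lines[:i] + head + tail)
-- ===== Notes on version B (the rewrite author's own statement) =====
-- stated objective: alternative
-- what changed: Replaces A's single stateful pass (boolean flag, line-by-line accumulator) by locate-the-pivot-then-assemble: one scan finds the first line containing 'theorem', then the output is built from three slices (untouched prefix, the two replacement lines, indented suffix).
import Mathlib
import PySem

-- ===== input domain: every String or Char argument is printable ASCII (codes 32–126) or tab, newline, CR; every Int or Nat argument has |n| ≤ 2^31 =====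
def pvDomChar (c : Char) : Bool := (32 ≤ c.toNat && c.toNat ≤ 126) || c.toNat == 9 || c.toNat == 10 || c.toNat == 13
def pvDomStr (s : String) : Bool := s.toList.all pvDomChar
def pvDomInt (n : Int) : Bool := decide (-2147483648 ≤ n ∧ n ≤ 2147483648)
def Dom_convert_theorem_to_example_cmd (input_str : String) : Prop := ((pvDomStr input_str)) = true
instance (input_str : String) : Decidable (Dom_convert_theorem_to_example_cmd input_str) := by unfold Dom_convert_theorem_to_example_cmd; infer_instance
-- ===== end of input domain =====

-- B rebuilds the output from slices around the first 'theorem' line instead of A's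
-- flag-carrying single pass; same O(n) cost (objective: alternative decomposition).

-- ===== PORT A =====
-- the loop over lines with the accumulator and the theorem_found flag
def pvA_loop (lines : List String) (acc : List String) (found : Bool) : List String :=
  match lines with
  | [] => acc
  | line :: rest =>
    if found = false then
      if PySem.Str.find line "theorem" ≠ -1 then
        pvA_loop rest (acc ++ [PySem.Str.slice line none (some (PySem.Str.find line "theorem")) ++ "example := by",
                               "  have" ++ PySem.Str.slice line (some (PySem.Str.find line "theorem" + PySem.Str.len "theorem")) none]) true
      else
        pvA_loop rest (acc ++ [line]) false
    else
      pvA_loop rest (acc ++ ["  " ++ line]) found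

-- split('\n') with the literal nonempty separator never raises; getD [] is unreachable
def convert_theorem_to_example_cmd (input_str : String) : String :=
  PySem.Str.join "\n" (pvA_loop ((PySem.Str.split? input_str "\n").getD []) [] false)

-- ===== PORT B =====
-- the enumerate scan for the pivot: first (index, pos, line) with line.find('theorem') != -1
def pvB_scan (lines : List String) (i : Nat) : Option (Nat × Int × String) :=
  match lines with
  | [] => none
  | line :: rest =>
    if PySem.Str.find line "theorem" ≠ -1 then some (i, PySem.Str.find line "theorem", line)
    else pvB_scan rest (i + 1)

def convert_theorem_to_example_cmd_alt (input_str : String) : String :=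
  match pvB_scan ((PySem.Str.split? input_str "\n").getD []) 0 with
  | none => PySem.Str.join "\n" ((PySem.Str.split? input_str "\n").getD [])
  | some (i, pos, line) =>
    PySem.Str.join "\n"
      (PySem.List.slice ((PySem.Str.split? input_str "\n").getD []) none (some (i : Int)) ++
       [PySem.Str.slice line none (some pos) ++ "example := by",
        "  have" ++ PySem.Str.slice line (some (pos + PySem.Str.len "theorem")) none] ++
       (PySem.List.slice ((PySem.Str.split? input_str "\n").getD []) (some ((i : Int) + 1)) none).map
         (fun l => "  " ++ l))

-- ===== PRECONDITION & SPEC =====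
def Spec_convert_theorem_to_example_cmd (input_str : String) (out : String) : Prop := out = convert_theorem_to_example_cmd_alt input_str
instance (input_str : String) (out : String) : Decidable (Spec_convert_theorem_to_example_cmd input_str out) := by unfold Spec_convert_theorem_to_example_cmd; infer_instance

-- ===== CLAIM (what is proved, stated in full; the proofs are below) =====
def Claim_equal_convert_theorem_to_example_cmd : Prop := ∀ (input_str : String), Dom_convert_theorem_to_example_cmd input_str → Spec_convert_theorem_to_example_cmd input_str (convert_theorem_to_example_cmd input_str)

-- ===== LEMMAS AND PROOFS =====

-- once the flag is set, A only indents the remaining lines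
theorem pvA_loop_true (lines : List String) (acc : List String) :
    pvA_loop lines acc true = acc ++ lines.map (fun l => "  " ++ l) := by
  induction lines generalizing acc with
  | nil => simp [pvA_loop]
  | cons l rest ih => simp [pvA_loop, ih]

-- shifting the running index of B's scan
theorem pvB_scan_shift (lines : List String) (n : Nat) :
    pvB_scan lines n = (pvB_scan lines 0).map (fun t => (t.1 + n, t.2)) := by
  induction lines generalizing n with
  | nil => simp [pvB_scan]
  | cons l rest ih =>
    simp only [pvB_scan]
    split_ifs with h
    · simp
    · rw [ih (n + 1), ih 1]
      cases pvB_scan rest 0 <;> simp <;> omega 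

-- A's fold equals B's pivot-and-slices assembly (on the line list, take/drop form)
theorem pvA_eq_assemble (lines acc : List String) :
    pvA_loop lines acc false =
      match pvB_scan lines 0 with
      | none => acc ++ lines
      | some (i, pos, line) =>
          acc ++ lines.take i ++
          [PySem.Str.slice line none (some pos) ++ "example := by",
           "  have" ++ PySem.Str.slice line (some (pos + PySem.Str.len "theorem")) none] ++
          (lines.drop (i + 1)).map (fun l => "  " ++ l) := by
  induction lines generalizing acc with
  | nil => simp [pvA_loop, pvB_scan]
  | cons l rest ih =>
    by_cases h : PySem.Str.find l "theorem" ≠ -1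
    · simp only [pvA_loop, pvB_scan, if_pos h]
      simp [pvA_loop_true]
    · simp only [pvA_loop, pvB_scan, if_neg h]
      rw [ih, pvB_scan_shift rest 1]
      cases hs : pvB_scan rest 0 with
      | none => simp
      | some t =>
        obtain ⟨i, pos, line⟩ := t
        simp

-- ===== VERDICT (by name: the statement is the Claim_ definition above) =====
theorem convert_theorem_to_example_cmd_spec : Claim_equal_convert_theorem_to_example_cmd := by
  intro input_str _
  unfold Spec_convert_theorem_to_example_cmd convert_theorem_to_example_cmd convert_theorem_to_example_cmd_alt
  rw [pvA_eq_assemble]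
  cases hs : pvB_scan ((PySem.Str.split? input_str "\n").getD []) 0 with
  | none => simp
  | some t =>
    obtain ⟨i, pos, line⟩ := t
    have h1 := PySem.List.slice_to_natCast ((PySem.Str.split? input_str "\n").getD []) i
    have h2 := PySem.List.slice_from_natCast ((PySem.Str.split? input_str "\n").getD []) (i + 1)
    push_cast at h2
    simp [h1, h2]
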